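-- pv_equiv track=rewrite | github.com/MrBrantCode/unitest_baseline | mut_generate/mist_train_cf/cf_86677/solution.py | longest_sublist
-- ===== SOURCE A (Python) =====
-- def longest_sublist(lst, target):
--     longest = []
--     for i in range(len(lst)):
--         for j in range(i, len(lst)):
--             sublist = lst[i:j+1]
--             if sum(sublist) > target and any(num % 2 != 0 for num in sublist):
--                 if len(sublist) > len(longest):
--                     longest = sublist
--     return longest
-- ===== SOURCE B (Python) =====
-- def longest_sublist(lst, target):
--     n = len(lst)
--     best_start = 0
--     best_len = 0
--     for i in range(n):
--         s = 0
--         odd = False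
--         for j in range(i, n):
--             s += lst[j]
--             if lst[j] % 2 != 0:
--                 odd = True
--             if s > target and odd and j - i + 1 > best_len:
--                 best_start = i
--                 best_len = j - i + 1
--     return lst[best_start:best_start + best_len]
-- ===== Notes on version B (the rewrite author's own statement) =====
-- stated objective: faster
-- what changed: Replaced the per-pair slice/sum/any scans with a running sum and a running odd-flag in the inner loop, tracking only the best (start, length) pair and slicing once at the end.
import Mathlib
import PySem

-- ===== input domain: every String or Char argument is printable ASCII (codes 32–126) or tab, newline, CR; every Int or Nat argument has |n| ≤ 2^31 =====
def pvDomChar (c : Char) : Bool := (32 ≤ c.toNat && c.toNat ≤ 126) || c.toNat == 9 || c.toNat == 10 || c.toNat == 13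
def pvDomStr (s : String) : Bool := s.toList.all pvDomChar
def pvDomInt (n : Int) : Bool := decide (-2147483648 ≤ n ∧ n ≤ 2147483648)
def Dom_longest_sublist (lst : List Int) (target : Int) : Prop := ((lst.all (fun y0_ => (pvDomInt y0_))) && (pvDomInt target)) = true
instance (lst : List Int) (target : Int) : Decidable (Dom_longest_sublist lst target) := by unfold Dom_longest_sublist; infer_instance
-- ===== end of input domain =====

-- B replaces A's per-pair slice/sum/any rescans by a running sum and odd-flag in the
-- inner loop, tracking only the best (start, length); measurably faster (O(n^2) loop
-- iterations instead of A's O(n^3) total scanning work).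

-- ===== PORT A =====
-- body of A's inner 'for j' loop
def pvStepA (lst : List Int) (target i : Int) (longest : List Int) (j : Int) : List Int :=
  let sublist := PySem.List.slice lst (some i) (some (j + 1))
  if sublist.sum > target ∧ sublist.any (fun num => PySem.Int.mod num 2 != 0) = true then
    if sublist.length > longest.length then sublist else longest
  else longest

def longest_sublist (lst : List Int) (target : Int) : List Int :=
  (PySem.List.pyRange 0 (lst.length : Int) 1).foldl
    (fun longest i =>
      (PySem.List.pyRange i (lst.length : Int) 1).foldl (pvStepA lst target i) longest)
    []

-- ===== PORT B =====
-- body of B's inner 'for j' loop; state = (s, odd, best_start, best_len)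
def pvStepB (lst : List Int) (target i : Int) (acc : Int × Bool × Int × Int) (j : Int) :
    Int × Bool × Int × Int :=
  let s := acc.1 + PySem.List.pyGetD lst j 0
  let odd := if PySem.Int.mod (PySem.List.pyGetD lst j 0) 2 != 0 then true else acc.2.1
  if s > target ∧ odd = true ∧ j - i + 1 > acc.2.2.2 then (s, odd, i, j - i + 1)
  else (s, odd, acc.2.2.1, acc.2.2.2)

def longest_sublist_alt (lst : List Int) (target : Int) : List Int :=
  let best :=
    (PySem.List.pyRange 0 (lst.length : Int) 1).foldl
      (fun (b : Int × Int) i =>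
        let r := (PySem.List.pyRange i (lst.length : Int) 1).foldl (pvStepB lst target i)
                   (0, false, b.1, b.2)
        (r.2.2.1, r.2.2.2))
      (0, 0)
  PySem.List.slice lst (some best.1) (some (best.1 + best.2))

-- ===== PRECONDITION & SPEC =====
def Spec_longest_sublist (lst : List Int) (target : Int) (out : List Int) : Prop := out = longest_sublist_alt lst target
instance (lst : List Int) (target : Int) (out : List Int) : Decidable (Spec_longest_sublist lst target out) := by unfold Spec_longest_sublist; infer_instance

-- ===== CLAIM (what is proved, stated in full; the proofs are below) =====
def Claim_equal_longest_sublist : Prop := ∀ (lst : List Int) (target : Int), Dom_longest_sublist lst target → Spec_longest_sublist lst target (longest_sublist lst target)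

-- ===== LEMMAS AND PROOFS =====

-- slice lst [i:j+1] is slice lst [i:j] with element j appended
lemma pv_slice_snoc (lst : List Int) (i j : Int) (hi : 0 ≤ i) (hij : i ≤ j)
    (hj : j < (lst.length : Int)) :
    PySem.List.slice lst (some i) (some (j + 1))
      = PySem.List.slice lst (some i) (some j) ++ [PySem.List.pyGetD lst j 0] := by
  rw [PySem.List.slice_toNat _ hi (by omega), PySem.List.slice_toNat _ hi (by omega),
      PySem.List.pyGetD_eq_getElem (xs := lst) (i := j) (d := 0) (by omega) hj]
  have h1 : (j+1).toNat - i.toNat = (j.toNat - i.toNat) + 1 := by omega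
  have h4 : j.toNat - i.toNat < (lst.drop i.toNat).length := by
    simp [List.length_drop]; omega
  rw [h1, List.take_add_one, List.getElem?_eq_getElem h4]
  simp [List.getElem_drop]
  congr 2
  omega

-- length of slice lst [i:j] as an Int
lemma pv_len_slice (lst : List Int) (i j : Int) (hi : 0 ≤ i) (hij : i ≤ j)
    (hj : j ≤ (lst.length : Int)) :
    (((PySem.List.slice lst (some i) (some j)).length : Int)) = j - i := by
  rw [PySem.List.slice_toNat _ hi (by omega)]
  simp [List.length_take, List.length_drop]
  omega

-- inner-loop equivalence: for a fixed i, folding from j to n keeps the two states aligned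
lemma pv_inner (lst : List Int) (target i : Int) (hi : 0 ≤ i) :
    ∀ (k : Nat) (j : Int), ((lst.length : Int) - j).toNat = k → i ≤ j →
    j ≤ (lst.length : Int) →
    ∀ (L : List Int) (bs bl : Int),
      L = PySem.List.slice lst (some bs) (some (bs + bl)) → (L.length : Int) = bl →
      (PySem.List.pyRange j (lst.length : Int) 1).foldl (pvStepA lst target i) L
        = PySem.List.slice lst
            (some (((PySem.List.pyRange j (lst.length : Int) 1).foldl (pvStepB lst target i)
              ((PySem.List.slice lst (some i) (some j)).sum,
               (PySem.List.slice lst (some i) (some j)).any (fun num => PySem.Int.mod num 2 != 0),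
               bs, bl)).2.2.1))
            (some (((PySem.List.pyRange j (lst.length : Int) 1).foldl (pvStepB lst target i)
              ((PySem.List.slice lst (some i) (some j)).sum,
               (PySem.List.slice lst (some i) (some j)).any (fun num => PySem.Int.mod num 2 != 0),
               bs, bl)).2.2.1 +
             ((PySem.List.pyRange j (lst.length : Int) 1).foldl (pvStepB lst target i)
              ((PySem.List.slice lst (some i) (some j)).sum,
               (PySem.List.slice lst (some i) (some j)).any (fun num => PySem.Int.mod num 2 != 0),
               bs, bl)).2.2.2))
      ∧ ((((PySem.List.pyRange j (lst.length : Int) 1).foldl (pvStepA lst target i) L).length : Int))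
          = ((PySem.List.pyRange j (lst.length : Int) 1).foldl (pvStepB lst target i)
              ((PySem.List.slice lst (some i) (some j)).sum,
               (PySem.List.slice lst (some i) (some j)).any (fun num => PySem.Int.mod num 2 != 0),
               bs, bl)).2.2.2 := by
  intro k
  induction k with
  | zero =>
    intro j hk hij hjn L bs bl hL hlen
    rw [PySem.List.pyRange_one_eq_nil (by omega)]
    simp only [List.foldl_nil]
    exact ⟨hL, hlen⟩
  | succ k ih =>
    intro j hk hij hjn L bs bl hL hlen
    have hjlt : j < (lst.length : Int) := by omega
    have hsn := pv_slice_snoc lst i j hi hij hjlt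
    have hlenS' : (((PySem.List.slice lst (some i) (some (j+1))).length : Int)) = j + 1 - i :=
      pv_len_slice lst i (j+1) hi (by omega) (by omega)
    have hBstate : pvStepB lst target i
        ((PySem.List.slice lst (some i) (some j)).sum,
         (PySem.List.slice lst (some i) (some j)).any (fun num => PySem.Int.mod num 2 != 0),
         bs, bl) j =
        if (PySem.List.slice lst (some i) (some (j+1))).sum > target ∧
           (PySem.List.slice lst (some i) (some (j+1))).any (fun num => PySem.Int.mod num 2 != 0) = true ∧
           j - i + 1 > bl
        then ((PySem.List.slice lst (some i) (some (j+1))).sum,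
              (PySem.List.slice lst (some i) (some (j+1))).any (fun num => PySem.Int.mod num 2 != 0),
              i, j - i + 1)
        else ((PySem.List.slice lst (some i) (some (j+1))).sum,
              (PySem.List.slice lst (some i) (some (j+1))).any (fun num => PySem.Int.mod num 2 != 0),
              bs, bl) := by
      simp only [pvStepB, hsn, List.sum_append, List.any_append, List.sum_cons, List.sum_nil,
        List.any_cons, List.any_nil, Bool.or_false, add_zero]
      cases h : (PySem.Int.mod (PySem.List.pyGetD lst j 0) 2 != 0) <;> simp_all
    rw [PySem.List.pyRange_one_cons hjlt]
    simp only [List.foldl_cons]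
    rw [hBstate]
    by_cases hc1 : (PySem.List.slice lst (some i) (some (j+1))).sum > target ∧
        (PySem.List.slice lst (some i) (some (j+1))).any (fun num => PySem.Int.mod num 2 != 0) = true
    · by_cases hc2 : j - i + 1 > bl
      · rw [if_pos ⟨hc1.1, hc1.2, hc2⟩]
        have hA : pvStepA lst target i L j = PySem.List.slice lst (some i) (some (j+1)) := by
          simp only [pvStepA]
          rw [if_pos hc1, if_pos (by omega)]
        rw [hA]
        exact ih (j+1) (by omega) (by omega) (by omega) _ i (j - i + 1)
          (by rw [show i + (j - i + 1) = j + 1 by ring]) (by omega)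
      · rw [if_neg (by tauto)]
        have hA : pvStepA lst target i L j = L := by
          simp only [pvStepA]
          rw [if_pos hc1, if_neg (by omega)]
        rw [hA]
        exact ih (j+1) (by omega) (by omega) (by omega) L bs bl hL hlen
    · rw [if_neg (by tauto)]
      have hA : pvStepA lst target i L j = L := by
        simp only [pvStepA]
        rw [if_neg hc1]
      rw [hA]
      exact ih (j+1) (by omega) (by omega) (by omega) L bs bl hL hlen

-- outer-loop equivalence
lemma pv_outer (lst : List Int) (target : Int) :
    ∀ (k : Nat) (i : Int), ((lst.length : Int) - i).toNat = k → 0 ≤ i →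
    i ≤ (lst.length : Int) →
    ∀ (L : List Int) (bs bl : Int),
      L = PySem.List.slice lst (some bs) (some (bs + bl)) → (L.length : Int) = bl →
      (PySem.List.pyRange i (lst.length : Int) 1).foldl
          (fun longest i' =>
            (PySem.List.pyRange i' (lst.length : Int) 1).foldl (pvStepA lst target i') longest) L
        = PySem.List.slice lst
            (some (((PySem.List.pyRange i (lst.length : Int) 1).foldl
              (fun (b : Int × Int) i' =>
                let r := (PySem.List.pyRange i' (lst.length : Int) 1).foldl (pvStepB lst target i')
                           (0, false, b.1, b.2)
                (r.2.2.1, r.2.2.2)) (bs, bl)).1))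
            (some (((PySem.List.pyRange i (lst.length : Int) 1).foldl
              (fun (b : Int × Int) i' =>
                let r := (PySem.List.pyRange i' (lst.length : Int) 1).foldl (pvStepB lst target i')
                           (0, false, b.1, b.2)
                (r.2.2.1, r.2.2.2)) (bs, bl)).1 +
              ((PySem.List.pyRange i (lst.length : Int) 1).foldl
              (fun (b : Int × Int) i' =>
                let r := (PySem.List.pyRange i' (lst.length : Int) 1).foldl (pvStepB lst target i')
                           (0, false, b.1, b.2)
                (r.2.2.1, r.2.2.2)) (bs, bl)).2)) := by
  intro k
  induction k with
  | zero =>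
    intro i hk hi0 hin L bs bl hL hlen
    rw [PySem.List.pyRange_one_eq_nil (by omega)]
    simpa using hL
  | succ k ih =>
    intro i hk hi0 hin L bs bl hL hlen
    have hilt : i < (lst.length : Int) := by omega
    have hnil : PySem.List.slice lst (some i) (some i) = [] := by
      rw [PySem.List.slice_toNat _ hi0 hi0]; simp
    have hinner := pv_inner lst target i hi0 ((lst.length : Int) - i).toNat i rfl le_rfl
      (by omega) L bs bl hL hlen
    rw [hnil] at hinner
    simp only [List.sum_nil, List.any_nil] at hinner
    rw [PySem.List.pyRange_one_cons hilt]
    simp only [List.foldl_cons]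
    exact ih (i+1) (by omega) (by omega) (by omega) _ _ _ hinner.1 hinner.2

-- ===== VERDICT (by name: the statement is the Claim_ definition above) =====
theorem longest_sublist_spec : Claim_equal_longest_sublist := by
  intro lst target _
  unfold Spec_longest_sublist longest_sublist longest_sublist_alt
  have hz : PySem.List.slice lst (some (0:Int)) (some ((0:Int)+0)) = ([] : List Int) := by
    rw [PySem.List.slice_toNat _ le_rfl (by norm_num)]; simp
  exact pv_outer lst target ((lst.length : Int) - 0).toNat 0 rfl le_rfl (by omega)
    [] 0 0 hz.symm rfl
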